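-- pv_equiv track=rewrite | github.com/KrzysiekBlankiewicz/inf_R_2LO_24-25 | 9.01_szyfrowanie/DeshifratorFull - Franciszek Bodziak.py | cezar_slowo
-- ===== SOURCE A (Python) =====
-- def cezar_slowo(slowo, n):
--     limit = 122
--     wynik = ""
--     for znak in slowo:
--         if 'b' <= znak <= 'z':
--             x = ord(znak)
--             x += n
--             if x > limit:
--                 x = (x - limit + 96)
--             wynik += chr(x)
--         else:
--             wynik += znak
--     return wynik
-- ===== SOURCE B (Python) =====
-- def cezar_slowo(slowo, n):
--     # divide and conquer: shift a single character at the leaf, otherwise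
--     # split the word in half, recurse on each half and concatenate.
--     if len(slowo) <= 1:
--         if slowo and 98 <= ord(slowo) <= 122:
--             x = ord(slowo) + n
--             if x > 122:
--                 x -= 26
--             return chr(x)
--         return slowo
--     m = len(slowo) // 2
--     return cezar_slowo(slowo[:m], n) + cezar_slowo(slowo[m:], n)
-- ===== Notes on version B (the rewrite author's own statement) =====
-- stated objective: alternative
-- what changed: A's left-to-right loop accumulating into a growing result string is replaced by a divide-and-conquer recursion: the word is split in half, each half is processed recursively and the two shifted halves are concatenated, with the Caesar shift (single wrap past 'z') applied only at one-character leaves.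
import Mathlib
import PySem

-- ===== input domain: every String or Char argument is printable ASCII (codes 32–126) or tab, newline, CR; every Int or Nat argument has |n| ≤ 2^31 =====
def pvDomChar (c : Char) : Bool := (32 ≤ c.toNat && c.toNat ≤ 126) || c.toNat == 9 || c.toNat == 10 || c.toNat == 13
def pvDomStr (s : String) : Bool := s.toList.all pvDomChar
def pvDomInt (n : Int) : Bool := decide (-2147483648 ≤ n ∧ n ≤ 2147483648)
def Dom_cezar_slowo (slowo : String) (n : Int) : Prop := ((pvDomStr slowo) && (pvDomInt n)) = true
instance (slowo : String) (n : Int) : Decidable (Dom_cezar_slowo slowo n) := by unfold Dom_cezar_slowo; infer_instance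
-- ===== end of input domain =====

-- B replaces A's left-to-right accumulator loop by a divide-and-conquer recursion
-- (split the word in half, recurse, concatenate); objective: alternative decomposition.

-- ===== PORT A =====
-- Literal port of A; chr(x) is ported as Char.ofNat x.toNat, exact on Pre_ (there x is a
-- non-negative valid non-surrogate scalar).
def cezar_slowo (slowo : String) (n : Int) : String :=
  String.ofList (slowo.toList.foldl (fun wynik znak =>
    if 'b' ≤ znak ∧ znak ≤ 'z' then
      let x : Int := (znak.toNat : Int)
      let x := x + n
      let x := if x > 122 then x - 122 + 96 else x
      wynik ++ [Char.ofNat x.toNat]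
    else
      wynik ++ [znak]) [])

-- ===== PORT B =====
-- Source B's recursion on the character list; slowo[:m] / slowo[m:] with 0 ≤ m ≤ len are
-- exactly take/drop; chr as in port A (exact on Pre_).
def cezar_slowo_alt_core (n : Int) (l : List Char) : List Char :=
  if l.length ≤ 1 then
    match l with
    | [] => []
    | c :: _ =>
      if 98 ≤ c.toNat ∧ c.toNat ≤ 122 then
        let x : Int := (c.toNat : Int) + n
        let x := if x > 122 then x - 26 else x
        [Char.ofNat x.toNat]
      else [c]
  else
    cezar_slowo_alt_core n (l.take (l.length / 2)) ++
      cezar_slowo_alt_core n (l.drop (l.length / 2))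
termination_by l.length
decreasing_by
  · simp only [List.length_take]; omega
  · simp only [List.length_drop]; omega

def cezar_slowo_alt (slowo : String) (n : Int) : String :=
  String.ofList (cezar_slowo_alt_core n slowo.toList)

-- ===== PRECONDITION & SPEC =====
-- Pre_ excludes inputs where some letter b..z shifts to an ordinal outside chr's range
-- (both Pythons raise ValueError/OverflowError there) or to a lone-surrogate ordinal
-- 0xD800..0xDFFF (such a one-surrogate string is not representable as a Lean String).
def Pre_cezar_slowo (slowo : String) (n : Int) : Prop :=
  (slowo.toList.all fun c =>
    !(98 ≤ c.toNat && c.toNat ≤ 122) ||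
      (let w : Int := (c.toNat : Int) + n - (if (c.toNat : Int) + n > 122 then 26 else 0)
       decide (0 ≤ w) && (decide (w < 55296) || (decide (57344 ≤ w) && decide (w ≤ 1114111))))) = true
instance (slowo : String) (n : Int) : Decidable (Pre_cezar_slowo slowo n) := by
  unfold Pre_cezar_slowo; infer_instance

def pvWitness_cezar_slowo : String × Int := ("abz xyz!", 3)

def Spec_cezar_slowo (slowo : String) (n : Int) (out : String) : Prop := out = cezar_slowo_alt slowo n
instance (slowo : String) (n : Int) (out : String) : Decidable (Spec_cezar_slowo slowo n out) := by unfold Spec_cezar_slowo; infer_instance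

-- ===== CLAIM (what is proved, stated in full; the proofs are below) =====
def Claim_equal_cezar_slowo : Prop := ∀ (slowo : String) (n : Int), Dom_cezar_slowo slowo n → Pre_cezar_slowo slowo n → Spec_cezar_slowo slowo n (cezar_slowo slowo n)

-- ===== LEMMAS AND PROOFS =====

-- the common per-character shift both sides compute
def pvShift (n : Int) (c : Char) : Char :=
  if 'b' ≤ c ∧ c ≤ 'z' then
    Char.ofNat ((if ((c.toNat : Int) + n) > 122 then ((c.toNat : Int) + n) - 122 + 96
                 else ((c.toNat : Int) + n)).toNat)
  else c

-- 'b' ≤ c ∧ c ≤ 'z' is exactly 98 ≤ ord c ≤ 122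
lemma letter_range (c : Char) : ('b' ≤ c ∧ c ≤ 'z') ↔ (98 ≤ c.toNat ∧ c.toNat ≤ 122) := by
  constructor
  · rintro ⟨h1, h2⟩; exact ⟨Nat.succ_le_of_lt h1, h2⟩
  · rintro ⟨h1, h2⟩; exact ⟨h1, h2⟩

-- B's divide-and-conquer computes the pointwise shift
lemma alt_core_eq_map (n : Int) :
    ∀ (k : Nat) (l : List Char), l.length ≤ k → cezar_slowo_alt_core n l = l.map (pvShift n) := by
  intro k
  induction k with
  | zero =>
    intro l hl
    have : l = [] := List.eq_nil_of_length_eq_zero (Nat.le_zero.mp hl)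
    subst this; rw [cezar_slowo_alt_core.eq_def]; rfl
  | succ k ih =>
    intro l hl
    rw [cezar_slowo_alt_core.eq_def]
    by_cases h1 : l.length ≤ 1
    · rw [if_pos h1]
      match l with
      | [] => rfl
      | [c] =>
        simp only [List.map]
        unfold pvShift
        by_cases hc : (98 ≤ c.toNat ∧ c.toNat ≤ 122)
        · rw [if_pos hc, if_pos ((letter_range c).mpr hc)]
          simp only [List.cons.injEq, and_true]
          congr 1
          split_ifs <;> omega
        · rw [if_neg hc, if_neg (fun h => hc ((letter_range c).mp h))]
      | c :: d :: t => simp at h1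
    · rw [if_neg h1]
      have hlen : 2 ≤ l.length := by omega
      rw [ih (l.take (l.length / 2)) (by simp only [List.length_take]; omega),
          ih (l.drop (l.length / 2)) (by simp only [List.length_drop]; omega),
          ← List.map_append, List.take_append_drop]

-- ===== VERDICT (by name: the statement is the Claim_ definition above) =====
theorem cezar_slowo_spec : Claim_equal_cezar_slowo := by
  intro slowo n _ _
  unfold Spec_cezar_slowo cezar_slowo cezar_slowo_alt
  congr 1
  have hfold : slowo.toList.foldl (fun wynik znak =>
      if 'b' ≤ znak ∧ znak ≤ 'z' then
        let x : Int := (znak.toNat : Int)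
        let x := x + n
        let x := if x > 122 then x - 122 + 96 else x
        wynik ++ [Char.ofNat x.toNat]
      else wynik ++ [znak]) []
      = slowo.toList.foldl (fun wynik znak => wynik ++ [pvShift n znak]) [] := by
    apply PySem.List.foldl_congr_mem
    intro acc c _
    unfold pvShift
    by_cases h : ('b' ≤ c ∧ c ≤ 'z')
    · rw [if_pos h, if_pos h]
    · rw [if_neg h, if_neg h]
  rw [hfold, PySem.List.foldl_append_singleton_eq_map,
      alt_core_eq_map n slowo.toList.length slowo.toList (le_refl _), List.nil_append]
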